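-- pv_equiv track=rewrite | github.com/miliar/Code_Jam_Webscraper | solutions_python/Problem_181/1296.py | case_solver
-- ===== SOURCE A (Python) =====
-- def case_solver(tc, N=None, P=None, I=None, T=None, S=None, **kwargs):
--     end = len(T)
--     res = ['', '']
--     while end > 0:
--         fl = sorted(T[:end])[-1]
--         i = T[:end].rindex(fl)
--         res[0] += fl
--         res[1] = T[i + 1:end] + res[1]
--         end = i
--     return 'Case #{:d}: {}'.format(tc, res[0] + res[1])
-- ===== SOURCE B (Python) =====
-- def case_solver(tc, N=None, P=None, I=None, T=None, S=None, **kwargs):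
--     # One left-to-right pass: a character is "kept" (moved to the front block)
--     # iff it is >= every character before it; kept chars come out reversed,
--     # the rest stay in order.
--     m = ''
--     sel = []
--     rest = []
--     for c in T:
--         if c >= m:
--             m = c
--             sel.append(c)
--         else:
--             rest.append(c)
--     return 'Case #{:d}: {}'.format(tc, ''.join(reversed(sel)) + ''.join(rest))
-- ===== Notes on version B (the rewrite author's own statement) =====
-- stated objective: faster
-- what changed: Replaced the while-loop that re-sorts each shrinking prefix and calls rindex to find the rightmost maximum with a single left-to-right pass that collects the running-maximum record characters (output = records reversed + the rest in order).
import Mathlib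
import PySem

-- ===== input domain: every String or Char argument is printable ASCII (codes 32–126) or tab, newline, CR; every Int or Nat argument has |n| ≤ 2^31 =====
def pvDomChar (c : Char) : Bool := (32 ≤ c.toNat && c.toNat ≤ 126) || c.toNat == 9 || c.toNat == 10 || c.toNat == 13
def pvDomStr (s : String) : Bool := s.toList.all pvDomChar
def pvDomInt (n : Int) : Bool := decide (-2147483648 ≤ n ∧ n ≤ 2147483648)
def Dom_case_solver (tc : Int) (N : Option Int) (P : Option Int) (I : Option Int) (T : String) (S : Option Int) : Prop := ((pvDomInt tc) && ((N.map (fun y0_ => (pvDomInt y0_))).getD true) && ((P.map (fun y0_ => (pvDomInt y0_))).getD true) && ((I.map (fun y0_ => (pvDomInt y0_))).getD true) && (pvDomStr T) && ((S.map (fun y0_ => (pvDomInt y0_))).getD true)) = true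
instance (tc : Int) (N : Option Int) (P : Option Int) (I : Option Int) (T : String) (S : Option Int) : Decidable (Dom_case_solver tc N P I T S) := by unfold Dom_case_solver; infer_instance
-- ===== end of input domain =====

-- B replaces A's O(n^2 log n) repeated sort-and-rindex over shrinking prefixes by a
-- single left-to-right pass keeping the running-maximum record characters (asymptotic speed-up).

-- ===== PORT A =====

-- T[:end].rindex(fl): highest index of fl, none = Python's ValueError (never hit: fl ∈ prefix)
def pvRindex (l : List Char) (c : Char) : Option Nat :=
  match l with
  | [] => none
  | x :: xs =>
    match pvRindex xs c with
    | some i => some (i + 1)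
    | none => if x = c then some 0 else none

-- the while loop: state (end, res[0], res[1]); returns res[0] ++ res[1]
def pvALoop (t : List Char) (e : Nat) (r0 r1 : List Char) : List Char :=
  if e = 0 then r0 ++ r1
  else
    let pre := t.take e
    match PySem.List.pyGet? (PySem.List.sorted pre (fun x => x) false) (-1) with
    | none => r0 ++ r1          -- unreachable (pre nonempty); totalization guard only
    | some fl =>
      match pvRindex pre fl with
      | none => r0 ++ r1        -- unreachable (fl ∈ pre); totalization guard only
      | some i =>
        if h : i < e then pvALoop t i (r0 ++ [fl]) (pre.drop (i + 1) ++ r1)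
        else r0 ++ r1           -- unreachable; totalization guard only
termination_by e

def case_solver (tc : Int) (N : Option Int) (P : Option Int) (I : Option Int) (T : String) (S : Option Int) : String :=
  String.mk ("Case #".toList ++ (PySem.Int.toStr tc).toList ++ ": ".toList
    ++ pvALoop T.toList T.toList.length [] [])

-- ===== PORT B =====

-- c >= m with m the running max, m = '' initially (None here): '' compares below every char
def pvOk (m : Option Char) (c : Char) : Bool :=
  match m with
  | none => true
  | some x => decide (x ≤ c)

-- one loop iteration of Source B: state (m, sel, rest)
def pvBStep (st : Option Char × List Char × List Char) (c : Char) : Option Char × List Char × List Char :=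
  if pvOk st.1 c then (some c, st.2.1 ++ [c], st.2.2) else (st.1, st.2.1, st.2.2 ++ [c])

def case_solver_alt (tc : Int) (N : Option Int) (P : Option Int) (I : Option Int) (T : String) (S : Option Int) : String :=
  let st := T.toList.foldl pvBStep (none, [], [])
  String.mk ("Case #".toList ++ (PySem.Int.toStr tc).toList ++ ": ".toList
    ++ (st.2.1.reverse ++ st.2.2))

-- ===== PRECONDITION & SPEC =====
def Spec_case_solver (tc : Int) (N : Option Int) (P : Option Int) (I : Option Int) (T : String) (S : Option Int) (out : String) : Prop := out = case_solver_alt tc N P I T S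
instance (tc : Int) (N : Option Int) (P : Option Int) (I : Option Int) (T : String) (S : Option Int) (out : String) : Decidable (Spec_case_solver tc N P I T S out) := by unfold Spec_case_solver; infer_instance

-- ===== CLAIM (what is proved, stated in full; the proofs are below) =====
def Claim_equal_case_solver : Prop := ∀ (tc : Int) (N : Option Int) (P : Option Int) (I : Option Int) (T : String) (S : Option Int), Dom_case_solver tc N P I T S → Spec_case_solver tc N P I T S (case_solver tc N P I T S)

-- ===== LEMMAS AND PROOFS =====

-- (records, non-records) of l starting from running max m
def pvRecs (m : Option Char) : List Char → List Char × List Char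
  | [] => ([], [])
  | c :: cs =>
    if pvOk m c then ((pvRecs (some c) cs).1.cons c, (pvRecs (some c) cs).2)
    else ((pvRecs m cs).1, (pvRecs m cs).2.cons c)

def pvMaxAfter (m : Option Char) (l : List Char) : Option Char :=
  l.foldl (fun m c => if pvOk m c then some c else m) m

theorem pvFoldl_bStep (l : List Char) (m : Option Char) (sel rest : List Char) :
    l.foldl pvBStep (m, sel, rest)
      = (pvMaxAfter m l, sel ++ (pvRecs m l).1, rest ++ (pvRecs m l).2) := by
  induction l generalizing m sel rest with
  | nil => simp [pvMaxAfter, pvRecs]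
  | cons c cs ih =>
    by_cases h : pvOk m c = true <;>
      simp [pvBStep, pvMaxAfter, pvRecs, h, ih, List.foldl_cons]

theorem pvRecs_append (l1 l2 : List Char) (m : Option Char) :
    pvRecs m (l1 ++ l2)
      = ((pvRecs m l1).1 ++ (pvRecs (pvMaxAfter m l1) l2).1,
         (pvRecs m l1).2 ++ (pvRecs (pvMaxAfter m l1) l2).2) := by
  induction l1 generalizing m with
  | nil => simp [pvRecs, pvMaxAfter]
  | cons c cs ih =>
    by_cases h : pvOk m c = true <;>
      simp [pvRecs, pvMaxAfter, h, ih, List.foldl_cons]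

theorem pvRecs_all_lt (x : Char) (l : List Char) (h : ∀ c ∈ l, c < x) :
    pvRecs (some x) l = ([], l) := by
  induction l with
  | nil => rfl
  | cons c cs ih =>
    have hc : ¬ (x ≤ c) := not_le.mpr (h c (by simp))
    simp [pvRecs, pvOk, hc, ih (fun c hm => h c (by simp [hm]))]

theorem pvOk_maxAfter (fl : Char) (l : List Char) (m : Option Char)
    (hall : ∀ c ∈ l, c ≤ fl) (hm : pvOk m fl = true) :
    pvOk (pvMaxAfter m l) fl = true := by
  induction l generalizing m with
  | nil => exact hm
  | cons c cs ih =>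
    have hc : c ≤ fl := hall c (by simp)
    by_cases h : pvOk m c = true
    · simpa [pvMaxAfter, h] using
        ih (some c) (fun d hd => hall d (by simp [hd])) (by simp [pvOk, hc])
    · simpa [pvMaxAfter, h] using ih m (fun d hd => hall d (by simp [hd])) hm

theorem pvRindex_none (l : List Char) (c : Char) (h : pvRindex l c = none) : c ∉ l := by
  induction l with
  | nil => simp
  | cons x xs ih =>
    cases hx : pvRindex xs c with
    | some i => simp [pvRindex, hx] at h
    | none =>
      simp only [pvRindex, hx] at h
      by_cases hxc : x = c
      · simp [hxc] at h
      · intro hmem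
        rcases List.mem_cons.mp hmem with h1 | h1
        · exact hxc h1.symm
        · exact ih hx h1

theorem pvRindex_some (l : List Char) (c : Char) (i : Nat) (h : pvRindex l c = some i) :
    ∃ p s, l = p ++ c :: s ∧ p.length = i ∧ c ∉ s := by
  induction l generalizing i with
  | nil => simp [pvRindex] at h
  | cons x xs ih =>
    cases hx : pvRindex xs c with
    | some j =>
      simp only [pvRindex, hx, Option.some.injEq] at h
      obtain ⟨p, s, hps, hlen, hns⟩ := ih j hx
      exact ⟨x :: p, s, by simp [hps], by simp [hlen]; omega, hns⟩
    | none =>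
      simp only [pvRindex, hx] at h
      by_cases hxc : x = c
      · subst hxc
        simp only [if_true, Option.some.injEq] at h
        exact ⟨[], xs, rfl, by simp only [List.length_nil]; omega, pvRindex_none xs x hx⟩
      · simp [hxc] at h

-- last element of a (≤)-sorted list bounds every member
theorem pvLast_ge : ∀ (l : List Char), l.Pairwise (· ≤ ·) → ∀ x fl : Char,
    x ∈ l → l.getLast? = some fl → x ≤ fl := by
  intro l
  induction l with
  | nil => intro _ x fl hx _; simp at hx
  | cons a as ih =>
    intro hp x fl hx hl
    cases as with
    | nil => simp at hx hl; simp [hx, hl]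
    | cons b bs =>
      have hp' := List.pairwise_cons.mp hp
      rcases List.mem_cons.mp hx with h1 | h1
      · subst h1
        exact le_trans (hp'.1 b (by simp)) (ih hp'.2 b fl (by simp) (by simpa using hl))
      · exact ih hp'.2 x fl h1 (by simpa using hl)

-- core step: splitting at the rightmost maximum
theorem pvRecs_split (p s : List Char) (fl : Char)
    (hp : ∀ c ∈ p, c ≤ fl) (hs : ∀ c ∈ s, c < fl) :
    pvRecs none (p ++ fl :: s) = ((pvRecs none p).1 ++ [fl], (pvRecs none p).2 ++ s) := by
  rw [pvRecs_append]
  have hok : pvOk (pvMaxAfter none p) fl = true := pvOk_maxAfter fl p none hp rfl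
  simp [pvRecs, hok, pvRecs_all_lt fl s hs]

theorem pvALoop_eq (t : List Char) (e : Nat) (he : e ≤ t.length) (r0 r1 : List Char) :
    pvALoop t e r0 r1
      = r0 ++ (pvRecs none (t.take e)).1.reverse ++ (pvRecs none (t.take e)).2 ++ r1 := by
  induction e using Nat.strong_induction_on generalizing r0 r1 with
  | _ e ih =>
    rw [pvALoop]
    by_cases he0 : e = 0
    · simp [he0, pvRecs]
    · simp only [if_neg he0]
      set pre := t.take e with hpre
      have hprelen : pre.length = e := by simp [hpre]; omega
      have hprene : pre ≠ [] := by
        intro h; rw [h] at hprelen; simp at hprelen; omega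
      -- the sorted prefix is nonempty, so pyGet? at -1 is its last element
      have hsne : PySem.List.sorted pre (fun x => x) false ≠ [] := by
        intro h
        exact hprene ((PySem.List.sorted_eq_nil_iff pre (fun x => x) false).mp h)
      cases hlast : (PySem.List.sorted pre (fun x => x) false).getLast? with
      | none => exact absurd (List.getLast?_eq_none_iff.mp hlast) hsne
      | some fl =>
        have hget : PySem.List.pyGet? (PySem.List.sorted pre (fun x => x) false) (-1)
            = some fl := by rw [PySem.List.pyGet?_neg_one, hlast]
        rw [hget]
        have hperm := PySem.List.sorted_perm pre (fun x => x) false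
        have hmax : ∀ c ∈ pre, c ≤ fl := by
          intro c hc
          exact pvLast_ge _ (by simpa using PySem.List.sorted_pairwise pre (fun x => x)) c fl
            ((hperm.mem_iff).mpr hc) hlast
        have hflmem : fl ∈ pre := by
          have := List.getLast?_eq_some_iff.mp hlast
          obtain ⟨ys, hys⟩ := this
          exact (hperm.mem_iff).mp (by simp [hys])
        cases hri : pvRindex pre fl with
        | none => exact absurd hflmem (pvRindex_none pre fl hri)
        | some i =>
          -- goal still shows the match; reduce it with hri below
          obtain ⟨p, s, hdecomp, hplen, hns⟩ := pvRindex_some pre fl i hri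
          have hie : i < e := by
            have : pre.length = p.length + 1 + s.length := by simp [hdecomp]; omega
            omega
          simp only [hri]
          rw [dif_pos hie, ih i hie (le_trans (le_of_lt hie) he)]
          -- t.take i = p ; pre.drop (i+1) = s
          have htakei : t.take i = p := by
            have : pre.take i = p := by
              rw [hdecomp, ← hplen, List.take_left]
            rw [← this, hpre, List.take_take, min_eq_left (le_of_lt hie)]
          have hdropi : pre.drop (i + 1) = s := by
            rw [hdecomp, ← hplen]
            have : p.length + 1 = (p ++ [fl]).length := by simp
            rw [this, show p ++ fl :: s = (p ++ [fl]) ++ s by simp, List.drop_left]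
          have hsplit : pvRecs none pre
              = ((pvRecs none p).1 ++ [fl], (pvRecs none p).2 ++ s) := by
            rw [hdecomp]
            exact pvRecs_split p s fl
              (fun c hc => hmax c (by simp [hdecomp, hc]))
              (fun c hc => lt_of_le_of_ne (hmax c (by simp [hdecomp, hc]))
                (fun h => hns (h ▸ hc)))
          rw [htakei, hdropi, hsplit]
          simp

-- ===== VERDICT (by name: the statement is the Claim_ definition above) =====
theorem case_solver_spec : Claim_equal_case_solver := by
  intro tc N P I T S _
  unfold Spec_case_solver case_solver case_solver_alt
  rw [pvALoop_eq T.toList T.toList.length (le_refl _) [] [],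
    List.take_length, pvFoldl_bStep T.toList none [] []]
  simp
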